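-- pv_equiv track=rewrite | github.com/swtkent/Game-Helpers | nerdle_helper.py | equations_could_be
-- ===== SOURCE A (Python) =====
-- def equations_could_be(eqn_list, known_locations, known_characters, characters_cant_be):
--     #input unknown letters of word as ? to tell program you don't know
--
--     #sift through the letters known and eliminate
--     ##pdb.set_trace()
--     eqn_list2 = eqn_list[:]
--     for character_pos in range(len(known_locations)):
--         character = known_locations[character_pos]
--         if character!='?':
--             for eqn in eqn_list2[:]:
--                 if character not in eqn:
--                     eqn_list2.remove(eqn)
--                 elif eqn[character_pos] is not character:
--                     eqn_list2.remove(eqn)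
--     #sift through letters known but don't know location
--     for character in known_characters.keys():
--         for eqn in eqn_list2[:]:
--             if character not in eqn:
--                 eqn_list2.remove(eqn)
--             else:
--                 for spot in known_characters[character]:
--                     if eqn[spot-1] is character:
--                         eqn_list2.remove(eqn)
--                         break
--     #sift through the letters not in there
--     for character in characters_cant_be:
--         for eqn in eqn_list2[:]:
--             if character in eqn:
--                 eqn_list2.remove(eqn)
--     return eqn_list2
-- ===== SOURCE B (Python) =====
-- def equations_could_be(eqn_list, known_locations, known_characters, characters_cant_be):
--     # single stable pass: keep an equation iff it satisfies every constraint at once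
--     def ok(eqn):
--         for pos, c in enumerate(known_locations):
--             if c != '?' and not (c in eqn and eqn[pos] is c):
--                 return False
--         for c, spots in known_characters.items():
--             if not (c in eqn and all(eqn[spot - 1] is not c for spot in spots)):
--                 return False
--         return all(c not in eqn for c in characters_cant_be)
--     return [eqn for eqn in eqn_list if ok(eqn)]
-- ===== Notes on version B (the rewrite author's own statement) =====
-- stated objective: simpler
-- what changed: A makes three destructive removal passes, each iterating over a fresh copy and calling list.remove on a shrinking list; B keeps the list intact and does one stable filter pass with a single combined predicate (known locations, known-but-misplaced characters, absent characters).
import Mathlib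
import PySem

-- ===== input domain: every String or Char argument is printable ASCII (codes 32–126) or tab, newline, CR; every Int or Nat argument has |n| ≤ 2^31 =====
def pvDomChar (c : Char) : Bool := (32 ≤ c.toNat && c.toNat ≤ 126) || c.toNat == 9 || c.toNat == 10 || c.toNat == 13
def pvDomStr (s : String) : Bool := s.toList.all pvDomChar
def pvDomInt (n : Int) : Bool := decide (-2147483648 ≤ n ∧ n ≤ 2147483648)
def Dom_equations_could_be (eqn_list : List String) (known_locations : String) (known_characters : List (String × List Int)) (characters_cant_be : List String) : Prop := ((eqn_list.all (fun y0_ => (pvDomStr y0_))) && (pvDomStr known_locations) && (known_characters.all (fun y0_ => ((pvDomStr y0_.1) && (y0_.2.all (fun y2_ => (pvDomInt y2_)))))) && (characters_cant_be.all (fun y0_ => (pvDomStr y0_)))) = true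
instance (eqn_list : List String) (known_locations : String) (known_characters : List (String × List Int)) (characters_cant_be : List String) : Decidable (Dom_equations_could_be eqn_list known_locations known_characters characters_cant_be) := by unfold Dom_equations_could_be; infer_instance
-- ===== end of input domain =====

-- B replaces A's three destructive removal passes (each rescanning and `remove`-ing from a
-- shrinking copy) by ONE stable filter with a combined predicate; objective: simpler.
-- Python `is` / `is not` between a 1-character string obtained by indexing and another string
-- is ported as string (in)equality (CPython caches the latin-1 singletons, and a string of
-- another length is never identical to a 1-character one).  Neither version mutates its arguments.

-- ===== PORT A =====
-- list.remove (drop first occurrence); the ValueError branch (`none`) is unreachable inside pvPass (proved below)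
def pvRemove (l : List String) (e : String) : List String :=
  (PySem.List.remove? l e).getD l

-- "for eqn in eqn_list2[:]: if cond(eqn): eqn_list2.remove(eqn)" — fold over the snapshot, state = current list
def pvPass (cond : String → Bool) (l : List String) : List String :=
  List.foldl (fun acc eqn => if cond eqn then pvRemove acc eqn else acc) l l

-- the removal decision of the first sift: "if character not in eqn: remove / elif eqn[character_pos] is not character: remove"
def pvCondLoc (character : Char) (character_pos : Int) (eqn : String) : Bool :=
  if !(PySem.Chars.isIn [character] eqn.toList) then true
  else if PySem.Chars.pyGet? eqn.toList character_pos ≠ some character then true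
  else false

-- the removal decision of the second sift ("break" after a remove = any); `eqn[spot-1] is character`
-- is identity of interned 1-char strings, i.e. equality (a key of another length is never identical);
-- none = IndexError, excluded by Pre_
def pvCondKnown (p : String × List Int) (eqn : String) : Bool :=
  if !(PySem.Chars.isIn p.1.toList eqn.toList) then true
  else p.2.any (fun spot =>
    match PySem.Chars.pyGet? eqn.toList (spot - 1) with
    | some ch => p.1.toList == [ch]
    | none => false)

def equations_could_be (eqn_list : List String) (known_locations : String) (known_characters : List (String × List Int)) (characters_cant_be : List String) : List String :=
  let eqn_list2 := eqn_list   -- eqn_list[:]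
  -- sift through the letters known and eliminate
  let l1 := (PySem.List.pyRange 0 (PySem.Chars.len known_locations.toList) 1).foldl
    (fun acc character_pos =>
      let character := PySem.List.pyGetD known_locations.toList character_pos '?'  -- in range for every pos of the range
      if character ≠ '?' then pvPass (pvCondLoc character character_pos) acc else acc) eqn_list2
  -- sift through letters known but don't know location
  -- (for character in known_characters.keys(): … known_characters[character]; a Python dict has unique keys, so this is the pair list)
  let l2 := known_characters.foldl (fun acc p => pvPass (pvCondKnown p) acc) l1
  -- sift through the letters not in there
  let l3 := characters_cant_be.foldl
    (fun acc character => pvPass (fun eqn => PySem.Chars.isIn character.toList eqn.toList) acc) l2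
  l3

-- ===== PORT B =====
-- the combined predicate of Source B's `ok`
def pvOk (known_locations : String) (known_characters : List (String × List Int)) (characters_cant_be : List String) (eqn : String) : Bool :=
  ((PySem.List.enumerate known_locations.toList).all (fun ci =>
      ci.2 == '?' ||
        (PySem.Chars.isIn [ci.2] eqn.toList &&
         PySem.Chars.pyGet? eqn.toList ci.1 == some ci.2)))
  && (known_characters.all (fun p =>
        PySem.Chars.isIn p.1.toList eqn.toList &&
        p.2.all (fun spot =>
          match PySem.Chars.pyGet? eqn.toList (spot - 1) with
          | some ch => !(p.1.toList == [ch])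
          | none => true)))
  && (characters_cant_be.all (fun c => !(PySem.Chars.isIn c.toList eqn.toList)))

def equations_could_be_alt (eqn_list : List String) (known_locations : String) (known_characters : List (String × List Int)) (characters_cant_be : List String) : List String :=
  eqn_list.filter (pvOk known_locations known_characters characters_cant_be)

-- ===== PRECONDITION & SPEC =====
-- Pre_ excludes exactly the inputs on which A raises an IndexError: some equation, at the
-- moment the sifts reach it, is indexed out of range (a checked known location past its end,
-- or a spot index out of range for a key the equation contains).  First-violation form:
-- the raising position/key must be reached, i.e. no earlier check already removed the equation.
def Pre_equations_could_be (eqn_list : List String) (known_locations : String) (known_characters : List (String × List Int)) (characters_cant_be : List String) : Prop :=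
  ∀ eqn ∈ eqn_list,
    -- the first sift does not raise on eqn
    (¬ ∃ ci ∈ PySem.List.enumerate known_locations.toList,
        (ci.2 ≠ '?' ∧ PySem.Chars.isIn [ci.2] eqn.toList = true ∧ (eqn.toList.length : Int) ≤ ci.1) ∧
        (∀ cj ∈ PySem.List.enumerate known_locations.toList, cj.1 < ci.1 →
          ¬(cj.2 ≠ '?' ∧ (PySem.Chars.isIn [cj.2] eqn.toList = false ∨
              PySem.Chars.pyGet? eqn.toList cj.1 ≠ some cj.2)))) ∧
    -- if eqn survives the first sift, the second sift does not raise on it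
    ¬((∀ ci ∈ PySem.List.enumerate known_locations.toList,
          ¬(ci.2 ≠ '?' ∧ (PySem.Chars.isIn [ci.2] eqn.toList = false ∨
              PySem.Chars.pyGet? eqn.toList ci.1 ≠ some ci.2))) ∧
      ∃ jp ∈ PySem.List.enumerate known_characters,
        (PySem.Chars.isIn jp.2.1.toList eqn.toList = true ∧
         ∃ ks ∈ PySem.List.enumerate jp.2.2,
           ¬ PySem.Raise.InRange eqn.toList.length (ks.2 - 1) ∧
           ∀ ks' ∈ PySem.List.enumerate jp.2.2, ks'.1 < ks.1 →
             (PySem.Raise.InRange eqn.toList.length (ks'.2 - 1) ∧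
              ¬ (PySem.Chars.pyGet? eqn.toList (ks'.2 - 1)).any
                  (fun ch => jp.2.1.toList == [ch]) = true)) ∧
        (∀ jq ∈ PySem.List.enumerate known_characters, jq.1 < jp.1 →
          ¬(PySem.Chars.isIn jq.2.1.toList eqn.toList = false ∨
            ∃ s ∈ jq.2.2, (PySem.Chars.pyGet? eqn.toList (s - 1)).any
                (fun ch => jq.2.1.toList == [ch]) = true)))
instance (eqn_list : List String) (known_locations : String) (known_characters : List (String × List Int)) (characters_cant_be : List String) : Decidable (Pre_equations_could_be eqn_list known_locations known_characters characters_cant_be) := by unfold Pre_equations_could_be; infer_instance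

def pvWitness_equations_could_be : List String × String × (List (String × List Int)) × List String :=
  (["1+1=2", "7-4=3"], "1????", [("2", [1])], ["9"])

def Spec_equations_could_be (eqn_list : List String) (known_locations : String) (known_characters : List (String × List Int)) (characters_cant_be : List String) (out : List String) : Prop := out = equations_could_be_alt eqn_list known_locations known_characters characters_cant_be
instance (eqn_list : List String) (known_locations : String) (known_characters : List (String × List Int)) (characters_cant_be : List String) (out : List String) : Decidable (Spec_equations_could_be eqn_list known_locations known_characters characters_cant_be out) := by unfold Spec_equations_could_be; infer_instance

-- ===== CLAIM (what is proved, stated in full; the proofs are below) =====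
def Claim_equal_equations_could_be : Prop := ∀ (eqn_list : List String) (known_locations : String) (known_characters : List (String × List Int)) (characters_cant_be : List String), Dom_equations_could_be eqn_list known_locations known_characters characters_cant_be → Pre_equations_could_be eqn_list known_locations known_characters characters_cant_be → Spec_equations_could_be eqn_list known_locations known_characters characters_cant_be (equations_could_be eqn_list known_locations known_characters characters_cant_be)

-- ===== LEMMAS AND PROOFS =====

theorem pvWitness_ok : Dom_equations_could_be (pvWitness_equations_could_be.1) (pvWitness_equations_could_be.2.1) (pvWitness_equations_could_be.2.2.1) (pvWitness_equations_could_be.2.2.2) ∧ Pre_equations_could_be (pvWitness_equations_could_be.1) (pvWitness_equations_could_be.2.1) (pvWitness_equations_could_be.2.2.1) (pvWitness_equations_could_be.2.2.2) := by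
  constructor <;> decide

theorem remove?_append_not_mem (pre t : List String) (e : String) (h : e ∉ pre) :
    PySem.List.remove? (pre ++ e :: t) e = some (pre ++ t) := by
  induction pre with
  | nil => simp [PySem.List.remove?_cons_self]
  | cons x pre ih =>
      have hx : x ≠ e := by intro hxe; exact h (by simp [hxe])
      rw [List.cons_append, PySem.List.remove?_cons_of_ne _ hx,
        ih (fun hm => h (List.mem_cons_of_mem _ hm))]
      rfl

-- the loop invariant of one removal pass: everything already kept fails the removal condition
theorem pvPass_go (p : String → Bool) (t : List String) : ∀ (pre : List String),
    (∀ x ∈ pre, p x = false) →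
    List.foldl (fun acc e => if p e then pvRemove acc e else acc) (pre ++ t) t
      = pre ++ t.filter (fun e => !p e) := by
  induction t with
  | nil => intro pre _; simp
  | cons e t ih =>
      intro pre hpre
      by_cases hp : p e = true
      · have hnm : e ∉ pre := fun hm => by simp [hpre e hm] at hp
        have hrem : pvRemove (pre ++ e :: t) e = pre ++ t := by
          simp [pvRemove, remove?_append_not_mem pre t e hnm]
        simpa [List.foldl_cons, hp, hrem, List.filter_cons] using ih pre hpre
      · have hp' : p e = false := by revert hp; cases p e <;> simp
        have step : (if p e then pvRemove (pre ++ e :: t) e else pre ++ e :: t) = (pre ++ [e]) ++ t := by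
          simp [hp']
        have hpre' : ∀ x ∈ pre ++ [e], p x = false := by
          intro x hx
          rcases List.mem_append.mp hx with h1 | h1
          · exact hpre x h1
          · simp at h1; subst h1; exact hp'
        calc List.foldl (fun acc e => if p e then pvRemove acc e else acc) (pre ++ e :: t) (e :: t)
            = List.foldl (fun acc e => if p e then pvRemove acc e else acc) ((pre ++ [e]) ++ t) t := by
              rw [List.foldl_cons, step]
          _ = (pre ++ [e]) ++ t.filter (fun e => !p e) := ih (pre ++ [e]) hpre'
          _ = pre ++ (e :: t).filter (fun e => !p e) := by simp [hp']

theorem pvPass_eq_filter (p : String → Bool) (l : List String) :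
    pvPass p l = l.filter (fun e => !p e) := by
  simpa using pvPass_go p l [] (by simp)

theorem foldl_pass {κ : Type} (cond : κ → String → Bool) (ks : List κ) : ∀ (l : List String),
    ks.foldl (fun acc k => pvPass (cond k) acc) l
      = l.filter (fun e => ks.all (fun k => !cond k e)) := by
  induction ks with
  | nil => intro l; simp
  | cons k ks ih =>
      intro l
      rw [List.foldl_cons, ih, pvPass_eq_filter, List.filter_filter]
      simp [List.all_cons, Bool.and_comm]

theorem not_pvCondLoc (c : Char) (pos : Int) (e : String) :
    (!pvCondLoc c pos e)
      = (PySem.Chars.isIn [c] e.toList && (PySem.Chars.pyGet? e.toList pos == some c)) := by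
  unfold pvCondLoc
  cases hIn : PySem.Chars.isIn [c] e.toList
  · simp
  · by_cases hq : PySem.Chars.pyGet? e.toList pos = some c <;>
      simp [← Bool.beq_eq_decide_eq]

theorem not_pvCondKnown (p : String × List Int) (e : String) :
    (!pvCondKnown p e)
      = (PySem.Chars.isIn p.1.toList e.toList &&
         p.2.all (fun spot =>
           match PySem.Chars.pyGet? e.toList (spot - 1) with
           | some ch => !(p.1.toList == [ch])
           | none => true)) := by
  unfold pvCondKnown
  cases hIn : PySem.Chars.isIn p.1.toList e.toList
  · simp
  · have hbody : (fun spot => match PySem.Chars.pyGet? e.toList (spot - 1) with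
        | some ch => !(p.1.toList == [ch])
        | none => true)
        = (fun spot => !((fun spot => match PySem.Chars.pyGet? e.toList (spot - 1) with
            | some ch => p.1.toList == [ch]
            | none => false) spot)) := by
      funext spot
      cases h : PySem.List.pyGet? e.toList (spot - 1) <;> simp [h]
    simp only [hbody, ← List.not_any_eq_all_not]
    simp

-- the first sift, expressed over enumerate (= Source B's enumerate)
theorem loc_all_eq (kl : List Char) (e : String) :
    ((PySem.List.enumerate kl).all (fun ci =>
        ci.2 == '?' ||
          (PySem.Chars.isIn [ci.2] e.toList &&
           PySem.Chars.pyGet? e.toList ci.1 == some ci.2)))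
      = ((PySem.List.pyRange 0 (PySem.Chars.len kl) 1).all (fun pos =>
          !(decide (PySem.List.pyGetD kl pos '?' ≠ '?') &&
            pvCondLoc (PySem.List.pyGetD kl pos '?') pos e))) := by
  apply Bool.eq_iff_iff.mpr
  simp only [List.all_eq_true]
  constructor
  · intro h pos hpos
    obtain ⟨h0, hlt⟩ := (PySem.List.mem_pyRange_one).1 hpos
    have hlen : pos < (kl.length : Int) := by
      simpa [PySem.Chars.len_eq] using hlt
    have hi : pos.toNat < kl.length := by omega
    have hmem : ((pos.toNat : Int), kl[pos.toNat]) ∈ PySem.List.enumerate kl := by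
      exact (PySem.List.mem_enumerate_iff kl 0 _).mpr ⟨pos.toNat, hi, by simp⟩
    have hbody := h _ hmem
    have hget : PySem.List.pyGetD kl pos '?' = kl[pos.toNat] :=
      PySem.List.pyGetD_eq_getElem _ _ h0 (by simpa [PySem.List.len_eq] using hlen)
    have hcast : ((pos.toNat : Nat) : Int) = pos := Int.toNat_of_nonneg h0
    rw [hget]
    simp only [hcast] at hbody
    by_cases hc : kl[pos.toNat] = '?'
    · simp [hc]
    · simp only [Bool.not_and, not_pvCondLoc]
      simp [hc] at hbody ⊢
      tauto
  · intro h ci hci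
    obtain ⟨i, hi, hp⟩ := (PySem.List.mem_enumerate_iff kl 0 ci).mp hci
    subst hp
    have hposmem : ((0 : Int) + (i : Int)) ∈ PySem.List.pyRange 0 (PySem.Chars.len kl) 1 := by
      refine (PySem.List.mem_pyRange_one).2 ⟨by positivity, ?_⟩
      have : ((i : Nat) : Int) < (kl.length : Int) := by exact_mod_cast hi
      simpa [PySem.Chars.len_eq] using by omega
    have hbody := h _ hposmem
    have hget : PySem.List.pyGetD kl ((0 : Int) + (i : Int)) '?' = kl[i] := by
      rw [show ((0 : Int) + (i : Int)) = ((i : Nat) : Int) by omega, PySem.List.pyGetD_natCast]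
      simp [hi]
    rw [hget] at hbody
    set ch := kl[i] with hch
    by_cases hc : ch = '?'
    · simp [hc]
    · simp only [Bool.not_and, not_pvCondLoc] at hbody
      simp [hc] at hbody ⊢
      tauto
  -- (the Pre_ hypothesis is not needed for A = B: both ports decide the out-of-range
  -- index the same way; Pre_ is what makes them faithful to the raising Python)

-- ===== VERDICT (by name: the statement is the Claim_ definition above) =====
theorem equations_could_be_spec : Claim_equal_equations_could_be := by
  intro eqn_list kl kcs cant _dom _pre
  unfold Spec_equations_could_be
  simp only [equations_could_be, equations_could_be_alt]
  rw [show (fun (acc : List String) (character_pos : Int) =>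
        let character := PySem.List.pyGetD kl.toList character_pos '?'
        if character ≠ '?' then pvPass (pvCondLoc character character_pos) acc else acc)
      = (fun acc character_pos =>
        pvPass (fun e => decide (PySem.List.pyGetD kl.toList character_pos '?' ≠ '?') &&
          pvCondLoc (PySem.List.pyGetD kl.toList character_pos '?') character_pos e) acc) from
    funext fun acc => funext fun pos => by
      by_cases hc : PySem.List.pyGetD kl.toList pos '?' ≠ '?'
      · simp [hc]
      · simp [hc, pvPass_eq_filter]]
  rw [foldl_pass, foldl_pass, foldl_pass, List.filter_filter, List.filter_filter]
  apply List.filter_congr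
  intro e _he
  unfold pvOk
  rw [loc_all_eq]
  rw [show (fun p => PySem.Chars.isIn p.1.toList e.toList &&
        p.2.all (fun spot =>
          match PySem.Chars.pyGet? e.toList (spot - 1) with
          | some ch => !(p.1.toList == [ch])
          | none => true))
      = (fun p => !pvCondKnown p e) from funext fun p => (not_pvCondKnown p e).symm]
  apply Bool.eq_iff_iff.mpr
  simp only [Bool.and_eq_true]
  tauto
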